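-- pv_equiv track=rewrite | github.com/fabrizzio-gz/project-euler | 000-050/P26.py | getMaxCycle
-- ===== SOURCE A (Python) =====
-- def getMaxCycle(str_num):
--     """
--     string: any sequence of chars
--     Returns the length of the longest sequence of repeating chars
--     """
--     # Break into parts and check equality
--     # Assume minimal recurring cycle of length 10
--     n = len(str_num)
--     len_cycle = n//2
--     len_check = 2
--     repeats = []
--     while len_check <= len_cycle:
--         str_sub = str_num[:len_check+1]
--         index = str_num.find(str_sub, len_check+1)
--         if index == len_check+1:
--             repeats.append(str_sub)
--         len_check += 1
--     # Check there are no repetitions: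
--     if len(repeats) > 1:
--         unit = repeats[0]
--         if repeats[1] == 2*unit:
--             # There's repetition
--             return len(unit)
--         else:
--             return max(map(len, repeats))
--     elif len(repeats) == 1:
--         return len(repeats[0])
--     else:
--         return 0
-- ===== SOURCE B (Python) =====
-- def getMaxCycle(str_num):
--     """
--     string: any sequence of chars
--     Returns the length of the longest sequence of repeating chars
--     """
--     s = str_num
--     n = len(s)
--     # Z-array in one pass: z[i] = length of the longest common prefix of s and s[i:]
--     z = [0]
--     l = r = 0
--     hits = []  # positions i (in increasing order) whose prefix s[:i] reoccurs at i
--     for i in range(1, n):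
--         k = min(r - i, z[i - l]) if i < r else 0
--         while i + k < n and s[k] == s[i + k]:
--             k += 1
--         z.append(k)
--         if i + k > r:
--             l, r = i, i + k
--         if 3 <= i <= n // 2 and k >= i:
--             hits.append(i)
--     if len(hits) > 1:
--         return hits[0] if hits[1] == 2 * hits[0] else hits[-1]
--     if len(hits) == 1:
--         return hits[0]
--     return 0
-- ===== Notes on version B (the rewrite author's own statement) =====
-- stated objective: faster
-- what changed: Replaces the per-length substring search (an str.find scan for every candidate prefix length) with a single-pass Z-algorithm that computes all prefix-match lengths at once and selects the answer from the matching positions by integer arithmetic instead of string comparisons.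
import Mathlib
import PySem

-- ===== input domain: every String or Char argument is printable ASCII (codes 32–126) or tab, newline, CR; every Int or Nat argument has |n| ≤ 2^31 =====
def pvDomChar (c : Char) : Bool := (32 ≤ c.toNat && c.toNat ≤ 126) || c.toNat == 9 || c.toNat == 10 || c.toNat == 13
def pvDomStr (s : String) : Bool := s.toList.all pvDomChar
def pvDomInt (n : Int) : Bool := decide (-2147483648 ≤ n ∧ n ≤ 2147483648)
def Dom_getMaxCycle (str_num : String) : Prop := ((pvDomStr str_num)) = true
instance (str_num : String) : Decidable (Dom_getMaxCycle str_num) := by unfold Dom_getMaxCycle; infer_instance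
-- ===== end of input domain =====

-- B replaces A's per-candidate-length str.find scans with a single-pass Z-algorithm; objective: faster.

-- ===== PORT A =====
-- one iteration of A's 'while len_check <= len_cycle' loop
def stepA (s : List Char) (repeats : List (List Char)) (lenCheck : Nat) : List (List Char) :=
  let strSub := PySem.Chars.slice s none (some ((lenCheck : Int) + 1))
  let index := PySem.Chars.findFrom s strSub ((lenCheck : Int) + 1) none
  if index = (lenCheck : Int) + 1 then repeats ++ [strSub] else repeats

-- A: collect every prefix s[:L] (L = len_check+1) found again at exactly position L, then pick
def getMaxCycle (str_num : String) : Int :=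
  let s := str_num.toList
  let n := s.length
  let lenCycle := n / 2
  let repeats := (List.range' 2 (lenCycle - 1)).foldl (stepA s) []
  match repeats with
  | [] => 0
  | [r0] => (r0.length : Int)
  | r0 :: r1 :: _ =>
      if r1 = r0 ++ r0 then (r0.length : Int)
      else ((PySem.List.max? (repeats.map fun r => (r.length : Int)) (fun y => y)).getD 0)

-- ===== PORT B =====
-- the inner 'while i + k < n and s[k] == s[i + k]: k += 1' loop of B
def zExtend (s : List Char) (i : Nat) (k : Nat) : Nat :=
  if h : i + k < s.length ∧ PySem.List.pyGet? s (k : Int) = PySem.List.pyGet? s ((i : Int) + (k : Int)) then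
    zExtend s i (k + 1)
  else k
termination_by s.length - (i + k)
decreasing_by omega

-- one iteration of B's 'for i in range(1, n)' loop; state = (z, l, r, hits);
-- z[i - l] is in range whenever i < r (proved in foldB_inv below), so getD is exact here
def stepB (s : List Char) (st : List Nat × Nat × Nat × List Nat) (i : Nat) :
    List Nat × Nat × Nat × List Nat :=
  let (z, l, r, hits) := st
  let k0 := if i < r then min (r - i) (z.getD (i - l) 0) else 0
  let k := zExtend s i k0
  let z' := z ++ [k]
  let lr := if r < i + k then (i, i + k) else (l, r)
  let hits' := if 3 ≤ i ∧ i ≤ s.length / 2 ∧ i ≤ k then hits ++ [i] else hits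
  (z', lr.1, lr.2, hits')

def getMaxCycle_alt (str_num : String) : Int :=
  let s := str_num.toList
  let n := s.length
  let st := (List.range' 1 (n - 1)).foldl (stepB s) ([0], 0, 0, [])
  let hits := st.2.2.2
  match hits with
  | [] => 0
  | [h0] => (h0 : Int)
  | h0 :: h1 :: _ =>
      if h1 = 2 * h0 then (h0 : Int)
      else (((PySem.List.pyGet? hits (-1)).getD 0 : Nat) : Int)

-- ===== PRECONDITION & SPEC =====
def Spec_getMaxCycle (str_num : String) (out : Int) : Prop := out = getMaxCycle_alt str_num
instance (str_num : String) (out : Int) : Decidable (Spec_getMaxCycle str_num out) := by unfold Spec_getMaxCycle; infer_instance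

-- ===== CLAIM (what is proved, stated in full; the proofs are below) =====
def Claim_equal_getMaxCycle : Prop := ∀ (str_num : String), Dom_getMaxCycle str_num → Spec_getMaxCycle str_num (getMaxCycle str_num)

-- ===== LEMMAS AND PROOFS =====

-- match length of two lists (length of their longest common prefix)
def mlen : List Char → List Char → Nat
  | a :: as, b :: bs => if a = b then mlen as bs + 1 else 0
  | _, _ => 0

-- lcp s i = length of the longest common prefix of s and s.drop i (the Z-value at position i)
def lcp (s : List Char) (i : Nat) : Nat := mlen s (s.drop i)

theorem le_mlen_iff (a : List Char) : ∀ (b : List Char) (k : Nat),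
    k ≤ mlen a b ↔ k ≤ a.length ∧ k ≤ b.length ∧ a.take k = b.take k := by
  induction a with
  | nil =>
    intro b k
    cases b <;> cases k <;> simp [mlen]
  | cons x as ih =>
    intro b k
    cases b with
    | nil => cases k <;> simp [mlen]
    | cons y bs =>
      cases k with
      | zero => simp
      | succ k =>
        by_cases hxy : x = y
        · subst hxy
          simp only [mlen, if_true, Nat.succ_le_succ_iff, List.length_cons,
            List.take_succ_cons, List.cons.injEq, true_and]
          rw [ih bs k]
        · simp only [mlen, if_neg hxy]
          simp [List.take_succ_cons, hxy]

theorem lcp_facts (s : List Char) (i : Nat) :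
    lcp s i ≤ s.length - i ∧ s.take (lcp s i) = (s.drop i).take (lcp s i) := by
  have h := (le_mlen_iff s (s.drop i) (mlen s (s.drop i))).mp le_rfl
  simp only [List.length_drop] at h
  exact ⟨h.2.1, h.2.2⟩

theorem le_lcp_iff (s : List Char) (i k : Nat) :
    k ≤ lcp s i ↔ k ≤ s.length - i ∧ s.take k = (s.drop i).take k := by
  rw [lcp, le_mlen_iff]
  simp only [List.length_drop]
  exact ⟨fun ⟨_, h2, h3⟩ => ⟨h2, h3⟩, fun ⟨h2, h3⟩ => ⟨by omega, h2, h3⟩⟩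

theorem zcond_iff (s : List Char) (i k : Nat) (hk : k ≤ lcp s i) :
    (i + k < s.length ∧ PySem.List.pyGet? s (k : Int) = PySem.List.pyGet? s ((i : Int) + (k : Int)))
      ↔ k + 1 ≤ lcp s i := by
  have hik : ((i : Int) + (k : Int)) = ((i + k : Nat) : Int) := by push_cast; ring
  rw [hik]
  simp only [PySem.List.pyGet?_natCast]
  constructor
  · rintro ⟨hlt, heq⟩
    rw [le_lcp_iff]
    have htk := ((le_lcp_iff s i k).mp hk).2
    constructor
    · omega
    · rw [List.take_add_one, List.take_add_one, htk]
      congr 1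
      rw [List.getElem?_drop]
      rw [heq]
  · intro h
    have h2 := (le_lcp_iff s i (k + 1)).mp h
    constructor
    · omega
    · have := h2.2
      have hk' : k < k + 1 := by omega
      have e1 : (s.take (k+1))[k]? = ((s.drop i).take (k+1))[k]? := by rw [this]
      rw [List.getElem?_take_of_lt hk', List.getElem?_take_of_lt hk'] at e1
      rw [e1, List.getElem?_drop]

theorem zExtend_eq (s : List Char) (i k : Nat) (hk : k ≤ lcp s i) (hn : i + k ≤ s.length) :
    zExtend s i k = lcp s i := by
  have hm : ∀ m, ∀ k, k ≤ lcp s i → i + k ≤ s.length → lcp s i - k = m → zExtend s i k = lcp s i := by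
    intro m
    induction m with
    | zero =>
      intro k hk hn hm
      have hke : k = lcp s i := by omega
      rw [zExtend]
      rw [dif_neg]
      · exact hke
      · intro hcond
        have := (zcond_iff s i k hk).mp hcond
        omega
    | succ m ih =>
      intro k hk hn hm
      have hcond : i + k < s.length ∧ PySem.List.pyGet? s (k : Int) = PySem.List.pyGet? s ((i : Int) + (k : Int)) := by
        apply (zcond_iff s i k hk).mpr
        omega
      rw [zExtend, dif_pos hcond]
      exact ih (k + 1) ((zcond_iff s i k hk).mp hcond) (by omega) (by omega)
  exact hm (lcp s i - k) k hk hn rfl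

theorem zstart (s : List Char) (l i r : Nat) (h1 : 1 ≤ l) (hli : l < i) (hir : i < r)
    (hr : r = l + lcp s l) :
    min (r - i) (lcp s (i - l)) ≤ lcp s i ∧ i + min (r - i) (lcp s (i - l)) ≤ s.length := by
  set n := s.length with hn
  have hL := lcp_facts s l
  have hln : l ≤ n := by
    by_contra hc
    have : lcp s l = 0 := by omega
    omega
  have hrn : r ≤ n := by omega
  set k0 := min (r - i) (lcp s (i - l)) with hk0
  have hkn : i + k0 ≤ n := by omega
  refine ⟨?_, hkn⟩
  rw [le_lcp_iff]
  refine ⟨by omega, ?_⟩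
  set d := i - l with hd
  have hdl : d + l = i := by omega
  have hD := lcp_facts s d
  -- step 1: s.take k0 = (s.drop d).take k0   (since k0 ≤ lcp s d)
  have st1 : s.take k0 = (s.drop d).take k0 := by
    have := ((le_lcp_iff s d k0).mp (by omega)).2
    exact this
  -- step 2: (s.drop d).take k0 = (s.drop i).take k0
  have st2 : (s.drop d).take k0 = (s.drop i).take k0 := by
    have e1 : s.take (lcp s l) = (s.drop l).take (lcp s l) := hL.2
    have e2 : ((s.drop l).take (lcp s l)).drop d = ((s.take (lcp s l)).drop d) := by rw [e1]
    rw [List.drop_take, List.drop_take] at e2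
    -- e2 : ((s.drop l).drop d).take (lcp s l - d) = (s.drop d).take (lcp s l - d)
    have e3 : ((s.drop l).drop d).take (lcp s l - d) = (s.drop d).take (lcp s l - d) := e2
    rw [List.drop_drop] at e3
    have hdi : l + d = i := by omega
    rw [hdi] at e3
    have hk0le : k0 ≤ lcp s l - d := by omega
    calc (s.drop d).take k0 = ((s.drop d).take (lcp s l - d)).take k0 := by
            rw [List.take_take, min_eq_left hk0le]
      _ = ((s.drop i).take (lcp s l - d)).take k0 := by rw [← e3]
      _ = (s.drop i).take k0 := by rw [List.take_take, min_eq_left hk0le]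
  rw [st1, st2]

def hitsPred (s : List Char) (j : Nat) : Bool :=
  decide (3 ≤ j ∧ j ≤ s.length / 2 ∧ j ≤ lcp s j)

theorem getD_zlist (f : Nat → Nat) (c j : Nat) (h1 : 1 ≤ j) (hc : j ≤ c) :
    (0 :: (List.range' 1 c).map f).getD j 0 = f j := by
  obtain ⟨j', rfl⟩ : ∃ j', j = j' + 1 := ⟨j - 1, by omega⟩
  have hj' : j' < c := by omega
  simp only [List.getD, List.getElem?_cons_succ]
  rw [List.getElem?_map]
  rw [List.getElem?_range' ]
  · simp [Nat.add_comm]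
  · exact hj'

theorem foldB_inv (s : List Char) (c : Nat) (hc : c ≤ s.length) :
    ∃ l r, (List.range' 1 c).foldl (stepB s) ([0], 0, 0, []) =
      (0 :: (List.range' 1 c).map (lcp s), l, r, (List.range' 1 c).filter (hitsPred s))
      ∧ (c + 1 ≤ r → 1 ≤ l ∧ l ≤ c ∧ r = l + lcp s l) := by
  induction c with
  | zero => exact ⟨0, 0, by simp, by omega⟩
  | succ c ih =>
    obtain ⟨l, r, hfold, hlr⟩ := ih (by omega)
    set i := c + 1 with hi
    have hrange : List.range' 1 (c + 1) = List.range' 1 c ++ [c + 1] := by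
      rw [List.range'_concat, Nat.one_mul]
      rw [Nat.add_comm 1 c]
    rw [hrange, List.foldl_append, hfold]
    simp only [List.foldl_cons, List.foldl_nil, List.map_append, List.filter_append,
      List.map_cons, List.map_nil, List.filter_cons, List.filter_nil]
    have hk : zExtend s (c + 1)
        (if c + 1 < r then min (r - (c + 1)) ((0 :: (List.range' 1 c).map (lcp s)).getD ((c + 1) - l) 0) else 0)
        = lcp s (c + 1) := by
      by_cases hir : c + 1 < r
      · have h3 := hlr (by omega)
        rw [if_pos hir, getD_zlist _ _ _ (by omega) (by omega)]
        have hz := zstart s l (c + 1) r h3.1 (by omega) hir h3.2.2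
        exact zExtend_eq s (c + 1) _ hz.1 hz.2
      · rw [if_neg hir]
        exact zExtend_eq s (c + 1) 0 (by omega) (by omega)
    simp only [stepB, hk]
    have hhits : (if 3 ≤ c + 1 ∧ c + 1 ≤ s.length / 2 ∧ c + 1 ≤ lcp s (c + 1) then
            List.filter (hitsPred s) (List.range' 1 c) ++ [c + 1]
          else List.filter (hitsPred s) (List.range' 1 c))
        = List.filter (hitsPred s) (List.range' 1 c)
            ++ (if hitsPred s (c + 1) = true then [c + 1] else []) := by
      by_cases hp : 3 ≤ c + 1 ∧ c + 1 ≤ s.length / 2 ∧ c + 1 ≤ lcp s (c + 1)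
      · rw [if_pos hp, if_pos (by simpa [hitsPred] using hp)]
      · rw [if_neg hp, if_neg (by simpa [hitsPred] using hp), List.append_nil]
    rw [hhits]
    refine ⟨_, _, rfl, ?_⟩
    by_cases hupd : r < c + 1 + lcp s (c + 1)
    · simp only [if_pos hupd]
      intro _
      exact ⟨by omega, by omega, by trivial⟩
    · simp only [if_neg hupd]
      intro h2
      have h3 := hlr (by omega)
      exact ⟨h3.1, by omega, h3.2.2⟩

def goodQ (s : List Char) (j : Nat) : Bool := decide (3 ≤ j ∧ j ≤ lcp s j)

def goods (s : List Char) : List Nat := (List.range' 3 (s.length / 2 - 1)).filter (goodQ s)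

theorem good_le_half (s : List Char) (j : Nat) (h : j ≤ lcp s j) (_hj : 1 ≤ j) :
    2 * j ≤ s.length := by
  have := (lcp_facts s j).1
  omega

theorem hits_eq_goods (s : List Char) :
    (List.range' 1 (s.length - 1)).filter (hitsPred s) = goods s := by
  set n := s.length with hn
  have hcong : ∀ (L : List Nat), L.filter (hitsPred s) = L.filter (goodQ s) := by
    intro L
    apply List.filter_congr
    intro j _
    simp only [hitsPred, goodQ, decide_eq_decide]
    constructor
    · rintro ⟨a, _, b⟩; exact ⟨a, b⟩
    · rintro ⟨a, b⟩
      have := good_le_half s j b (by omega)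
      exact ⟨a, by omega, b⟩
  rw [hcong, goods]
  by_cases hn6 : n < 6
  · rw [List.filter_eq_nil_iff.mpr, List.filter_eq_nil_iff.mpr]
    · intro j hj
      have := List.mem_range'.mp hj
      simp only [goodQ, decide_eq_true_eq]
      rintro ⟨h3, hl⟩
      have := good_le_half s j hl (by omega)
      omega
    · intro j hj
      have := List.mem_range'.mp hj
      simp only [goodQ, decide_eq_true_eq]
      rintro ⟨h3, hl⟩
      have := good_le_half s j hl (by omega)
      omega
  · -- n ≥ 6
    have e1 : List.range' 1 (n - 1) = List.range' 1 2 ++ List.range' 3 (n - 3) := by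
      have := @List.range'_append 1 2 (n - 3) 1
      simp only [Nat.one_mul] at this
      rw [show (2 + (n-3)) = n - 1 by omega] at this
      rw [← this]
    have e2 : List.range' 3 (n - 3) = List.range' 3 (n / 2 - 1) ++ List.range' (3 + (n / 2 - 1)) (n - 3 - (n / 2 - 1)) := by
      have := @List.range'_append 3 (n / 2 - 1) (n - 3 - (n / 2 - 1)) 1
      simp only [Nat.one_mul] at this
      rw [show (n / 2 - 1 + (n - 3 - (n / 2 - 1))) = n - 3 by omega] at this
      rw [← this]
    rw [e1, List.filter_append, e2, List.filter_append]
    have f1 : (List.range' 1 2).filter (goodQ s) = [] := by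
      simp [List.range', goodQ]
    have f3 : (List.range' (3 + (n / 2 - 1)) (n - 3 - (n / 2 - 1))).filter (goodQ s) = [] := by
      apply List.filter_eq_nil_iff.mpr
      intro j hj
      have hm := List.mem_range'.mp hj
      simp only [goodQ, decide_eq_true_eq]
      rintro ⟨h3, hl⟩
      have := good_le_half s j hl (by omega)
      omega
    rw [f1, f3, List.nil_append, List.append_nil]

def pick (gs : List Nat) : Int :=
  match gs with
  | [] => 0
  | [g] => (g : Int)
  | g0 :: g1 :: _ => if g1 = 2 * g0 then (g0 : Int) else ((gs.getLast?.getD 0 : Nat) : Int)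

theorem alt_eq_pick (str_num : String) :
    getMaxCycle_alt str_num = pick (goods str_num.toList) := by
  unfold getMaxCycle_alt
  set s := str_num.toList with hs
  obtain ⟨l, r, hfold, -⟩ := foldB_inv s (s.length - 1) (by omega)
  simp only [hfold]
  rw [hits_eq_goods]
  rcases hg : goods s with _ | ⟨g0, _ | ⟨g1, rest⟩⟩
  · simp [pick]
  · simp [pick]
  · simp only [pick]
    by_cases hd : g1 = 2 * g0
    · rw [if_pos hd, if_pos hd]
    · rw [if_neg hd, if_neg hd, PySem.List.pyGet?_neg_one]

theorem foldl_append_ite_map {α β : Type} (p : α → Prop) [DecidablePred p] (f : α → β)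
    (l : List α) (acc : List β) :
    l.foldl (fun acc x => if p x then acc ++ [f x] else acc) acc
      = acc ++ (l.filter fun x => decide (p x)).map f := by
  induction l generalizing acc with
  | nil => simp
  | cons x t ih =>
    simp only [List.foldl_cons, List.filter_cons]
    by_cases hp : p x
    · rw [if_pos hp, ih, if_pos (by simpa using hp)]
      simp
    · rw [if_neg hp, ih, if_neg (by simpa using hp)]

theorem findFrom_eq_self_iff (s sub : List Char) (L : Nat) (hL : L ≤ s.length) :
    (PySem.Chars.findFrom s sub (L : Int) none = (L : Int)) ↔ sub <+: s.drop L := by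
  rw [PySem.Chars.findFrom_natCast s sub L hL]
  by_cases hne : PySem.Chars.find (s.drop L) sub = -1
  · rw [if_pos hne]
    constructor
    · intro h; omega
    · intro h
      exact absurd ((PySem.Chars.find_ne_neg_one_iff _ _).mpr h.isInfix) (by simp [hne])
  · rw [if_neg hne]
    have hnn : 0 ≤ PySem.Chars.find (s.drop L) sub := by
      have := PySem.Chars.neg_one_le_find (s.drop L) sub
      omega
    constructor
    · intro h
      have h0 : PySem.Chars.find (s.drop L) sub = 0 := by omega
      have := (PySem.Chars.find_spec (s := s.drop L) (sub := sub) (by omega)).1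
      rw [h0] at this
      simpa using this
    · intro h
      have hspec := PySem.Chars.find_spec (s := s.drop L) (sub := sub) hnn
      by_cases h0 : (PySem.Chars.find (s.drop L) sub).toNat = 0
      · omega
      · exact absurd (hspec.2 0 (by omega)) (by simpa using h)

theorem prefix_iff_le_lcp (s : List Char) (L : Nat) (hL : L ≤ s.length) :
    (s.take L <+: s.drop L) ↔ L ≤ lcp s L := by
  rw [le_lcp_iff]
  constructor
  · intro h
    have hlen := h.length_le
    simp only [List.length_take, List.length_drop] at hlen
    have hlt : (s.take L).length = L := by simp; omega
    constructor
    · omega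
    · have := List.prefix_iff_eq_take.mp h
      rw [this, hlt]
  · rintro ⟨h1, h2⟩
    rw [h2]
    exact List.take_prefix _ _

theorem stepA_eq (s : List Char) (acc : List (List Char)) (t : Nat) :
    stepA s acc t = if PySem.Chars.findFrom s (s.take (t + 1)) ((t + 1 : Nat) : Int) none
        = ((t + 1 : Nat) : Int) then acc ++ [s.take (t + 1)] else acc := by
  have hcast : ((t : Int) + 1) = (((t + 1 : Nat)) : Int) := by push_cast; ring
  simp only [stepA, hcast, PySem.Chars.slice_eq_listSlice, PySem.List.slice_to_natCast]

theorem repeats_eq (s : List Char) :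
    (List.range' 2 (s.length / 2 - 1)).foldl (stepA s) [] = (goods s).map (fun g => s.take g) := by
  set n := s.length with hn
  set m := n / 2 - 1 with hm
  have h1 : (List.range' 2 m).foldl (stepA s) []
      = (List.range' 2 m).foldl (fun acc t =>
          if PySem.Chars.findFrom s (s.take (t + 1)) ((t + 1 : Nat) : Int) none
            = ((t + 1 : Nat) : Int) then acc ++ [s.take (t + 1)] else acc) [] := by
    apply List.foldl_ext
    intro acc t ht
    exact stepA_eq s acc t
  rw [h1, foldl_append_ite_map, List.nil_append]
  have h2 : (List.range' 2 m).filter (fun t =>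
        decide (PySem.Chars.findFrom s (s.take (t + 1)) ((t + 1 : Nat) : Int) none = ((t + 1 : Nat) : Int)))
      = (List.range' 2 m).filter (fun t => goodQ s (t + 1)) := by
    apply List.filter_congr
    intro t ht
    have hmem := List.mem_range'.mp ht
    have htn : t + 1 ≤ n := by omega
    simp only [goodQ, decide_eq_decide]
    rw [findFrom_eq_self_iff s _ (t + 1) htn, prefix_iff_le_lcp s (t + 1) htn]
    constructor
    · intro h; exact ⟨by omega, h⟩
    · intro h; exact h.2
  rw [h2]
  have h3 : List.range' 3 m = (List.range' 2 m).map (fun t => t + 1) := by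
    have := @List.map_add_range' 1 2 m 1
    rw [← this]
    apply List.map_congr_left
    intro t _
    omega
  rw [goods, ← hn, ← hm, h3, List.filter_map, List.map_map]
  rfl

theorem take_double_iff (s : List Char) (g0 g1 : Nat) (h0 : g0 ≤ lcp s g0) (hn0 : 2 * g0 ≤ s.length)
    (hn1 : g1 ≤ s.length) :
    s.take g1 = s.take g0 ++ s.take g0 ↔ g1 = 2 * g0 := by
  constructor
  · intro h
    have := congrArg List.length h
    simp only [List.length_take, List.length_append] at this
    omega
  · intro h
    subst h
    rw [two_mul, List.take_add]
    congr 1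
    exact ((le_lcp_iff s g0 g0).mp h0).2.symm

theorem foldl_max_sorted : ∀ (t : List Int) (x : Int), List.Pairwise (· ≤ ·) (x :: t) →
    t.foldl max x = (x :: t).getLast (by simp) := by
  intro t
  induction t with
  | nil => intro x _; simp
  | cons y t ih =>
    intro x hp
    have hxy : x ≤ y := (List.pairwise_cons.mp hp).1 y (by simp)
    have hp' : List.Pairwise (· ≤ ·) (y :: t) := (List.pairwise_cons.mp hp).2
    rw [List.foldl_cons, max_eq_right hxy, List.getLast_cons (by simp)]
    exact ih y hp'

theorem goods_props (s : List Char) : (goods s).Pairwise (· < ·)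
    ∧ ∀ g ∈ goods s, 3 ≤ g ∧ g ≤ lcp s g ∧ 2 * g ≤ s.length := by
  constructor
  · exact List.Pairwise.sublist List.filter_sublist
      (by simpa using List.pairwise_lt_range' (s := 3) (n := s.length / 2 - 1))
  · intro g hg
    have h1 := List.of_mem_filter hg
    simp only [goodQ, decide_eq_true_eq] at h1
    exact ⟨h1.1, h1.2, good_le_half s g h1.2 (by omega)⟩

theorem a_eq_pick (str_num : String) : getMaxCycle str_num = pick (goods str_num.toList) := by
  unfold getMaxCycle
  set s := str_num.toList with hs
  simp only [repeats_eq]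
  obtain ⟨hpw, hmem⟩ := goods_props s
  rcases hg : goods s with - | ⟨g0, - | ⟨g1, rest⟩⟩
  · simp [pick]
  · have h0 := hmem g0 (by rw [hg]; simp)
    simp only [List.map_cons, List.map_nil, pick]
    have : (s.take g0).length = g0 := by simp; omega
    rw [this]
  · have h0 := hmem g0 (by rw [hg]; simp)
    have h1 := hmem g1 (by rw [hg]; simp)
    simp only [List.map_cons, pick]
    rw [hg] at hpw
    have hdbl : (s.take g1 = s.take g0 ++ s.take g0) ↔ g1 = 2 * g0 :=
      take_double_iff s g0 g1 h0.2.1 h0.2.2 (by omega)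
    by_cases hd : g1 = 2 * g0
    · rw [if_pos (hdbl.mpr hd), if_pos hd]
      have : (s.take g0).length = g0 := by simp; omega
      rw [this]
    · rw [if_neg (fun h => hd (hdbl.mp h)), if_neg hd]
      have e0 : (s.take g0).length = g0 := by simp; omega
      have e1 : (s.take g1).length = g1 := by simp; omega
      have hmap : (((s.take g0).length : Int) :: ((s.take g1).length : Int)
            :: ((rest.map fun g => s.take g).map fun r => (r.length : Int)))
          = ((g0 : Int) :: (g1 : Int) :: rest.map (fun g : Nat => (g : Int))) := by
        rw [e0, e1, List.map_map]
        congr 1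
        congr 1
        apply List.map_congr_left
        intro g hgmem
        have hgp := hmem g (by rw [hg]; simp [hgmem])
        simp only [Function.comp_apply, List.length_take]
        omega
      rw [show ((PySem.List.max? (((s.take g0).length : Int) :: ((s.take g1).length : Int)
            :: ((rest.map fun g => s.take g).map fun r => (r.length : Int))) (fun y => y)).getD 0)
          = ((PySem.List.max? ((g0 : Int) :: (g1 : Int) :: rest.map (fun g : Nat => (g : Int))) (fun y => y)).getD 0) by rw [hmap]]
      rw [PySem.List.max?_id_cons, Option.getD_some]
      have hple : List.Pairwise (· ≤ ·) ((g0 : Int) :: (g1 : Int) :: rest.map (fun g : Nat => (g : Int))) := by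
        have := List.Pairwise.map (fun g : Nat => (g : Int))
          (fun a b (h : a < b) => Int.ofNat_le.mpr (Nat.le_of_lt h)) hpw
        simpa using this
      rw [foldl_max_sorted _ _ hple]
      have hlast : (((g0 : Int) :: (g1 : Int) :: rest.map (fun g : Nat => (g : Int)))).getLast (by simp)
          = (((g0 :: g1 :: rest).getLast (by simp) : Nat) : Int) := by
        have a1 : ((g0 : Int) :: (g1 : Int) :: rest.map (fun g : Nat => (g : Int)))
            = (g0 :: g1 :: rest).map (fun g : Nat => (g : Int)) := by simp
        have b1 := List.getLast?_eq_some_getLast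
          (l := ((g0 : Int) :: (g1 : Int) :: rest.map (fun g : Nat => (g : Int)))) (by simp)
        have b2 : ((g0 : Int) :: (g1 : Int) :: rest.map (fun g : Nat => (g : Int))).getLast?
            = some ((((g0 :: g1 :: rest).getLast (by simp) : Nat) : Int)) := by
          rw [a1, List.getLast?_map, List.getLast?_eq_some_getLast (by simp)]
          rfl
        exact Option.some.inj (b1.symm.trans b2)
      rw [List.getLast?_eq_some_getLast (l := g0 :: g1 :: rest) (by simp), Option.getD_some]
      exact hlast

-- ===== VERDICT (by name: the statement is the Claim_ definition above) =====
theorem getMaxCycle_spec : Claim_equal_getMaxCycle := by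
  intro str_num _
  unfold Spec_getMaxCycle
  rw [a_eq_pick, alt_eq_pick]
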